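-- pv_equiv track=rewrite | github.com/ivanarena/dtu-02242-project | src/analyzer.py | well_formatted_loop
-- ===== SOURCE A (Python) =====
-- def well_formatted_loop(code):
--     stack = []
--     loops = []
--
--     filtered_code = ''.join(c for c in code if c in "+-<>[],.") # exclude comments
--
--     for i, cmd in enumerate(filtered_code):
--
--         if cmd == '[':
--             stack.append(i+1)
--         elif cmd == ']':
--             if not stack:
--                 raise SyntaxError(f"Unbalanced brackets at index {i + 1}")
--             start = stack.pop()
--
--             loops.append((start + 1, i + 1, filtered_code[start+1:i]))
--
--     if stack:
--         raise SyntaxError(f"Unbalanced brackets at index {stack[0]}")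
--
--     return loops
-- ===== SOURCE B (Python) =====
-- def well_formatted_loop(code):
--     filtered_code = ''.join(c for c in code if c in "+-<>[],.")  # exclude comments
--
--     # validity pass: check brackets balance before extracting anything
--     depth = 0
--     for i, cmd in enumerate(filtered_code):
--         if cmd == '[':
--             depth += 1
--         elif cmd == ']':
--             if depth == 0:
--                 raise SyntaxError(f"Unbalanced brackets at index {i + 1}")
--             depth -= 1
--     if depth != 0:
--         raise SyntaxError("Unbalanced brackets")
--
--     # for each ']' find its partner by scanning backwards with a nesting counter
--     loops = []
--     for j, cmd in enumerate(filtered_code):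
--         if cmd == ']':
--             d = 0
--             o = j - 1
--             while filtered_code[o] != '[' or d != 0:
--                 if filtered_code[o] == ']':
--                     d += 1
--                 elif filtered_code[o] == '[':
--                     d -= 1
--                 o -= 1
--             loops.append((o + 2, j + 1, filtered_code[o + 2:j]))
--     return loops
-- ===== Notes on version B (the rewrite author's own statement) =====
-- stated objective: alternative
-- what changed: A pairs brackets with an explicit stack in one pass; B first validates balance with a plain depth counter and then, for each ']', finds its partner by a backward scan with a nesting counter (no stack at all).
-- outside the precondition, e.g. on well_formatted_loop(']'): A raises SyntaxError, B raises SyntaxError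
import Mathlib
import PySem

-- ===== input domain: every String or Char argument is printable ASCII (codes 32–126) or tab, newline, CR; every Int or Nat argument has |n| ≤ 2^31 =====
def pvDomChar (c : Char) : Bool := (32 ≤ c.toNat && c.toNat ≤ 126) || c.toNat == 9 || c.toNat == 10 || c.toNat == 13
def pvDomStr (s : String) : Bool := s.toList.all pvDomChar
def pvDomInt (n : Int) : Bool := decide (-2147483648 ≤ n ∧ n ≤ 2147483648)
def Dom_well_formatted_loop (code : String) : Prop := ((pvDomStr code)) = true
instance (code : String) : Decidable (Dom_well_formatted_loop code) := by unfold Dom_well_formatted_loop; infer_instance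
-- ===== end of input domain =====

-- B replaces A's explicit bracket stack by a validity pass plus, per ']', a backward scan with a
-- nesting counter (objective: alternative algorithm, same results).

-- shared by both ports: the identical comment-filtering line of both Pythons
def pvFiltered (code : String) : List Char :=
  code.toList.filter (fun c => c ∈ "+-<>[],.".toList)

-- ===== PORT A =====
-- loop body of A: state = some (stack, loops); none marks the raise on ']' with empty stack
def pvStepA (fc : List Char) (st : Option (List Int × List (Int × Int × String)))
    (p : Int × Char) : Option (List Int × List (Int × Int × String)) :=
  match st with
  | none => none
  | some (stack, loops) =>
    if p.2 = '[' then some ((p.1 + 1) :: stack, loops)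
    else if p.2 = ']' then
      match stack with
      | [] => none
      | start :: rest =>
          some (rest, loops ++ [(start + 1, p.1 + 1,
            String.ofList (PySem.List.slice fc (some (start + 1)) (some p.1)))])
    else st

def well_formatted_loop (code : String) : List (Int × Int × String) :=
  let fc := pvFiltered code
  match (PySem.List.enumerate fc 0).foldl (pvStepA fc) (some ([], [])) with
  | none => []                                   -- SyntaxError inside the loop (excluded by Pre_)
  | some (stack, loops) => if stack = [] then loops else []   -- trailing 'if stack: raise' (excluded by Pre_)

-- ===== PORT B =====
-- B's backward while-loop ported as structural recursion over the REVERSED prefix before j;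
-- o tracks the Python index; exact for 0 ≤ o and the scan staying inside the prefix
def pvFindOpen : List Char → Int → Int → Option Int
  | [], _, _ => none
  | c :: rest, d, o =>
    if c = '[' then (if d = 0 then some o else pvFindOpen rest (d - 1) (o - 1))
    else if c = ']' then pvFindOpen rest (d + 1) (o - 1)
    else pvFindOpen rest d (o - 1)

-- B's validity pass: none marks the raise on ']' at depth 0; some d = final depth
def pvDepth (l : List Char) : Option Int :=
  (PySem.List.enumerate l 0).foldl (fun st p =>
    match st with
    | none => none
    | some d =>
      if p.2 = '[' then some (d + 1)
      else if p.2 = ']' then (if d = 0 then none else some (d - 1))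
      else some d) (some 0)

def pvStepB (fc : List Char) (loops : List (Int × Int × String)) (p : Int × Char) :
    List (Int × Int × String) :=
  if p.2 = ']' then
    match pvFindOpen ((fc.take p.1.toNat).reverse) 0 (p.1 - 1) with
    | some o => loops ++ [(o + 2, p.1 + 1,
        String.ofList (PySem.List.slice fc (some (o + 2)) (some p.1)))]
    | none => loops   -- unreachable: the validity pass guarantees a partner exists
  else loops

def well_formatted_loop_alt (code : String) : List (Int × Int × String) :=
  let fc := pvFiltered code
  match pvDepth fc with
  | none => []                                   -- SyntaxError (excluded by Pre_)
  | some d =>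
    if d ≠ 0 then []                             -- SyntaxError (excluded by Pre_)
    else (PySem.List.enumerate fc 0).foldl (pvStepB fc) []

-- ===== PRECONDITION & SPEC =====
-- Pre_ excludes exactly the inputs whose filtered code has unbalanced brackets: there the Python A
-- raises SyntaxError (and B raises too).
def Pre_well_formatted_loop (code : String) : Prop :=
  (∀ i : Nat, i ≤ (pvFiltered code).length →
      ((pvFiltered code).take i).count ']' ≤ ((pvFiltered code).take i).count '[')
  ∧ (pvFiltered code).count '[' = (pvFiltered code).count ']'
instance (code : String) : Decidable (Pre_well_formatted_loop code) := by
  unfold Pre_well_formatted_loop; infer_instance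

def pvWitness_well_formatted_loop : String := "+[ab[-]x,]."

def Spec_well_formatted_loop (code : String) (out : List (Int × Int × String)) : Prop :=
  out = well_formatted_loop_alt code
instance (code : String) (out : List (Int × Int × String)) :
    Decidable (Spec_well_formatted_loop code out) := by
  unfold Spec_well_formatted_loop; infer_instance

-- ===== CLAIM (what is proved, stated in full; the proofs are below) =====
def Claim_equal_well_formatted_loop : Prop :=
  ∀ (code : String), Dom_well_formatted_loop code → Pre_well_formatted_loop code →
    Spec_well_formatted_loop code (well_formatted_loop code)

-- ===== LEMMAS AND PROOFS =====

-- model of A's stack after a prefix (tail-on-empty makes it total; Pre_ keeps it faithful)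
def stkM (l : List Char) : List Int :=
  (PySem.List.enumerate l 0).foldl
    (fun s p => if p.2 = '[' then (p.1 + 1) :: s else if p.2 = ']' then s.tail else s) []

theorem enumerate_snoc {α : Type} (l : List α) (c : α) :
    PySem.List.enumerate (l ++ [c]) 0 = PySem.List.enumerate l 0 ++ [((l.length : Int), c)] := by
  rw [PySem.List.enumerate_append]
  simp [PySem.List.enumerate_cons, PySem.List.enumerate_nil]

theorem stkM_snoc (l : List Char) (c : Char) :
    stkM (l ++ [c]) =
      if c = '[' then ((l.length : Int) + 1) :: stkM l
      else if c = ']' then (stkM l).tail else stkM l := by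
  unfold stkM
  rw [enumerate_snoc, List.foldl_append]
  simp

theorem bscan_eq (l : List Char) (d : Nat) :
    pvFindOpen l.reverse (d : Int) ((l.length : Int) - 1) =
      (((stkM l).drop d).head?).map (fun x => x - 1) := by
  induction l using List.reverseRecOn generalizing d with
  | nil => simp [pvFindOpen, stkM, PySem.List.enumerate_nil]
  | append_singleton l c ih =>
    rw [List.reverse_append, stkM_snoc]
    simp only [List.reverse_cons, List.reverse_nil, List.nil_append, List.singleton_append,
      List.length_append, List.length_cons, List.length_nil]
    have harg2 : ((l.length + (0 + 1) : Nat) : Int) - 1 - 1 = ((l.length : Nat) : Int) - 1 := by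
      push_cast; ring
    by_cases h1 : c = '['
    · subst h1
      simp only [pvFindOpen, reduceIte]
      cases d with
      | zero => simp
      | succ k =>
        have hne : ((k + 1 : Nat) : Int) ≠ 0 := by omega
        rw [if_neg hne]
        have harg : ((k + 1 : Nat) : Int) - 1 = ((k : Nat) : Int) := by push_cast; ring
        rw [harg, harg2, ih k]
        simp
    · by_cases h2 : c = ']'
      · subst h2
        simp only [pvFindOpen, reduceIte]
        have harg : ((d : Nat) : Int) + 1 = ((d + 1 : Nat) : Int) := by norm_cast
        rw [harg, harg2, ih (d + 1)]
        simp [List.drop_tail]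
      · simp only [pvFindOpen, if_neg h1, if_neg h2]
        rw [harg2, ih d]

-- the combined invariant over a balanced-so-far prefix p of fc
theorem inv_lemma (fc : List Char) (p : List Char) (hpre : p <+: fc)
    (hok : ∀ i : Nat, i ≤ p.length → (p.take i).count ']' ≤ (p.take i).count '[') :
    (PySem.List.enumerate p 0).foldl (pvStepA fc) (some ([], [])) =
        some (stkM p, (PySem.List.enumerate p 0).foldl (pvStepB fc) [])
      ∧ (stkM p).length + p.count ']' = p.count '['
      ∧ pvDepth p = some ((p.count '[' : Int) - (p.count ']' : Int)) := by
  induction p using List.reverseRecOn with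
  | nil => simp [stkM, pvDepth, PySem.List.enumerate_nil]
  | append_singleton l c ih =>
    have hpre' : l <+: fc := ((l.prefix_append [c]).trans hpre)
    have hok' : ∀ i : Nat, i ≤ l.length → (l.take i).count ']' ≤ (l.take i).count '[' := by
      intro i hi
      have := hok i (by simp; omega)
      rwa [List.take_append_of_le_length hi] at this
    obtain ⟨ihA, ihLen, ihD⟩ := ih hpre' hok'
    have hfull := hok (l.length + 1) (by simp)
    rw [List.take_of_length_le (by simp)] at hfull
    have htake : fc.take l.length = l := (List.prefix_iff_eq_take.mp hpre').symm
    constructor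
    · -- state equality
      rw [enumerate_snoc, List.foldl_append, List.foldl_append, ihA, stkM_snoc]
      simp only [List.foldl_cons, List.foldl_nil]
      by_cases h1 : c = '['
      · simp [pvStepA, pvStepB, h1]
      · by_cases h2 : c = ']'
        · subst h2
          have hlen : 0 < (stkM l).length := by
            simp [h1] at hfull; omega
          obtain ⟨x, rest, hx⟩ : ∃ x rest, stkM l = x :: rest := by
            cases hstk : stkM l with
            | nil => rw [hstk] at hlen; simp at hlen
            | cons a b => exact ⟨a, b, rfl⟩
          have hb := bscan_eq l 0
          rw [hx] at hb
          simp only [List.drop_zero, List.head?_cons, Option.map_some] at hb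
          rw [Nat.cast_zero] at hb
          have hx1 : x - 1 + 2 = x + 1 := by ring
          simp [pvStepA, pvStepB, hx, htake, hb, h1, hx1]
        · simp [pvStepA, pvStepB, h1, h2]
    constructor
    · -- length invariant
      rw [stkM_snoc]
      by_cases h1 : c = '['
      · simp [h1] at ihLen ⊢; omega
      · by_cases h2 : c = ']'
        · subst h2
          have hlen : 0 < (stkM l).length := by simp [h1] at hfull; omega
          simp [h1, List.length_tail] at ihLen ⊢
          omega
        · simp [h1, h2] at ihLen ⊢; omega
    · -- depth pass
      unfold pvDepth at ihD ⊢
      rw [enumerate_snoc, List.foldl_append, ihD]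
      simp only [List.foldl_cons, List.foldl_nil]
      by_cases h1 : c = '['
      · simp [h1]; ring
      · by_cases h2 : c = ']'
        · subst h2
          have hlt : l.count ']' < l.count '[' := by simp [h1] at hfull; omega
          have hne : (l.count '[' : Int) - (l.count ']' : Int) ≠ 0 := by
            omega
          simp [h1, hne]
          ring
        · simp [h1, h2]

-- ===== VERDICT (by name: the statement is the Claim_ definition above) =====
theorem well_formatted_loop_spec : Claim_equal_well_formatted_loop := by
  intro code _ hPre
  obtain ⟨hok, hbal⟩ := hPre
  unfold Spec_well_formatted_loop
  show well_formatted_loop code = well_formatted_loop_alt code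
  simp only [well_formatted_loop, well_formatted_loop_alt]
  obtain ⟨hA, hLen, hD⟩ := inv_lemma (pvFiltered code) (pvFiltered code) (List.prefix_refl _) hok
  rw [hA, hD]
  have hstk : stkM (pvFiltered code) = [] := by
    rw [← List.length_eq_zero_iff]
    omega
  have hd0 : ((pvFiltered code).count '[' : Int) - ((pvFiltered code).count ']' : Int) = 0 := by
    rw [hbal]; ring
  simp [hstk, hd0]
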